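-- pv_equiv track=rewrite | github.com/itodnerd/WATT-simulate | evalAccessTable.py | lruStack
-- ===== SOURCE A (Python) =====
-- def lruStack(pidAndNextAndWrite: list[(int, int, int)], heatUp=0):
--     stack = [] # The stack
--     stackDist = {} # Fast access to counter of stack depth x
--     stackDistDirty = {} # Stack for dirty Accesses (if depth > buffersize: dirty page was evicted)
--     stackContains = {} # fast acces to check, if element was already loaded
--     dirty_depth = {} # -1 => page is clean
--     for pos in range(0, len(pidAndNextAndWrite)):
--         if pos == heatUp: # Heatup, ignore previous accesses
--             stackDist = {}
--         (pid, next, write) = pidAndNextAndWrite[pos]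
--
--         if pid in stackContains: # Old Value
--             depth = stack.index(pid)
--             stackDist[depth] = stackDist[depth] + 1 if (depth in stackDist) else 1
--             stack.remove(pid)
--
--             prev_dirty_depth = dirty_depth[pid]
--             dirty_depth[pid] = 0 if write else (-1 if(prev_dirty_depth == -1) else max(prev_dirty_depth, depth))
--             if write: # refresh
--                 if prev_dirty_depth != -1:
--                     d_depth = max(prev_dirty_depth, depth)
--                     # Mark in stack
--                     stackDistDirty[d_depth] = stackDistDirty[d_depth] +1 if d_depth in stackDistDirty else 1
--
--         else: # New value
--             if -1 in stackDist:
--                 stackDist[-1] = stackDist[-1] +1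
--             else:
--                 stackDist[-1] = 1
--             dirty_depth[pid] = 0 if write else -1
--         stack.insert(0, pid)
--         stackContains[pid]=0
--     return (stackDist, stackDistDirty)
-- ===== SOURCE B (Python) =====
-- def lruStack(pidAndNextAndWrite: list[(int, int, int)], heatUp=0):
--     # No explicit LRU stack: track each pid's last access position; the stack
--     # depth of pid equals the number of pids whose last access is more recent.
--     stackDist = {}
--     stackDistDirty = {}
--     dirty_depth = {}
--     last_pos = {}
--     for pos, (pid, next, write) in enumerate(pidAndNextAndWrite):
--         if pos == heatUp:
--             stackDist = {}
--         if pid in last_pos: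
--             mine = last_pos[pid]
--             depth = sum(1 for p in last_pos.values() if p > mine)
--             stackDist[depth] = stackDist.get(depth, 0) + 1
--             prev = dirty_depth[pid]
--             if write:
--                 dirty_depth[pid] = 0
--                 if prev != -1:
--                     d = max(prev, depth)
--                     stackDistDirty[d] = stackDistDirty.get(d, 0) + 1
--             else:
--                 dirty_depth[pid] = -1 if prev == -1 else max(prev, depth)
--         else:
--             stackDist[-1] = stackDist.get(-1, 0) + 1
--             dirty_depth[pid] = 0 if write else -1
--         last_pos[pid] = pos
--     return (stackDist, stackDistDirty)
-- ===== Notes on version B (the rewrite author's own statement) =====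
-- stated objective: alternative
-- what changed: Replaces the mutable LRU stack (list index/remove/insert-at-front) by a pid-to-last-access-position map; the stack depth of a pid is computed as the number of pids whose last access is more recent.
import Mathlib
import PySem

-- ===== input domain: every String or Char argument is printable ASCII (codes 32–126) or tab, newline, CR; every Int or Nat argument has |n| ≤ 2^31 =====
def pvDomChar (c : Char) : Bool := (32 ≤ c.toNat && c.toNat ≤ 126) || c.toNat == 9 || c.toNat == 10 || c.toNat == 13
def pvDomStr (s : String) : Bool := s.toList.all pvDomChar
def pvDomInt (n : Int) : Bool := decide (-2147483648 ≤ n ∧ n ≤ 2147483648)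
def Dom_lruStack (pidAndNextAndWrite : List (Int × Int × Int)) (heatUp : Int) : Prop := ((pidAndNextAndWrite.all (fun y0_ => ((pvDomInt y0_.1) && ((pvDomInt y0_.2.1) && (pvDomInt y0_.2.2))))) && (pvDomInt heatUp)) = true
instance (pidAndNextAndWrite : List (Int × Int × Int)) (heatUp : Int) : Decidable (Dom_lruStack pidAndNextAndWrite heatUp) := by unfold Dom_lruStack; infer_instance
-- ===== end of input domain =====

-- B replaces A's mutable LRU stack by a pid→last-access-position map (depth = count of more
-- recently accessed pids): a different data structure of the same cost (objective: alternative).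

-- ===== PORT A =====
-- state: (stack, stackDist, stackDistDirty, stackContains, dirty_depth)
def lruStepA (heatUp : Int)
    (st : List Int × PySem.Dict Int Int × PySem.Dict Int Int × PySem.Dict Int Int × PySem.Dict Int Int)
    (pe : Int × (Int × Int × Int)) :
    List Int × PySem.Dict Int Int × PySem.Dict Int Int × PySem.Dict Int Int × PySem.Dict Int Int :=
  let stack := st.1
  let stackDist0 := st.2.1
  let stackDistDirty := st.2.2.1
  let stackContains := st.2.2.2.1
  let dirty_depth := st.2.2.2.2
  let pos := pe.1
  let pid := pe.2.1
  let write := pe.2.2.2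
  let stackDist := if pos = heatUp then PySem.Dict.empty else stackDist0
  if stackContains.contains pid then
    match PySem.List.index? stack pid with
    | none => (stack, stackDist, stackDistDirty, stackContains, dirty_depth)  -- unreachable: pid is in stack whenever it is in stackContains
    | some dN =>
      let depth : Int := (dN : Int)
      let stackDist := stackDist.insert depth (if stackDist.contains depth then stackDist.getD depth 0 + 1 else 1)
      let stack := (PySem.List.remove? stack pid).getD stack  -- some here: pid ∈ stack
      let prev := dirty_depth.getD pid 0  -- pid is always a key of dirty_depth here
      let dirty_depth := dirty_depth.insert pid (if write ≠ 0 then 0 else if prev = -1 then -1 else max prev depth)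
      let stackDistDirty :=
        if write ≠ 0 then
          if prev ≠ -1 then
            let d_depth := max prev depth
            stackDistDirty.insert d_depth (if stackDistDirty.contains d_depth then stackDistDirty.getD d_depth 0 + 1 else 1)
          else stackDistDirty
        else stackDistDirty
      (pid :: stack, stackDist, stackDistDirty, stackContains.insert pid 0, dirty_depth)
  else
    let stackDist := stackDist.insert (-1) (if stackDist.contains (-1) then stackDist.getD (-1) 0 + 1 else 1)
    let dirty_depth := dirty_depth.insert pid (if write ≠ 0 then 0 else -1)
    (pid :: stack, stackDist, stackDistDirty, stackContains.insert pid 0, dirty_depth)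

def lruStack (pidAndNextAndWrite : List (Int × Int × Int)) (heatUp : Int) : (List (Int × Int)) × (List (Int × Int)) :=
  let fin := (PySem.List.enumerate pidAndNextAndWrite 0).foldl (lruStepA heatUp)
      ([], PySem.Dict.empty, PySem.Dict.empty, PySem.Dict.empty, PySem.Dict.empty)
  (fin.2.1.items, fin.2.2.1.items)

-- ===== PORT B =====
-- state: (stackDist, stackDistDirty, dirty_depth, last_pos)
def lruStepB (heatUp : Int)
    (st : PySem.Dict Int Int × PySem.Dict Int Int × PySem.Dict Int Int × PySem.Dict Int Int)
    (pe : Int × (Int × Int × Int)) :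
    PySem.Dict Int Int × PySem.Dict Int Int × PySem.Dict Int Int × PySem.Dict Int Int :=
  let stackDist0 := st.1
  let stackDistDirty := st.2.1
  let dirty_depth := st.2.2.1
  let lastPos := st.2.2.2
  let pos := pe.1
  let pid := pe.2.1
  let write := pe.2.2.2
  let stackDist := if pos = heatUp then PySem.Dict.empty else stackDist0
  if lastPos.contains pid then
    let mine := lastPos.getD pid 0
    let depth : Int := ((PySem.Dict.values lastPos).countP (fun p => mine < p) : Nat)
    let stackDist := stackDist.insert depth (stackDist.getD depth 0 + 1)
    let prev := dirty_depth.getD pid 0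
    if write ≠ 0 then
      let dirty_depth := dirty_depth.insert pid 0
      let stackDistDirty :=
        if prev ≠ -1 then
          stackDistDirty.insert (max prev depth) (stackDistDirty.getD (max prev depth) 0 + 1)
        else stackDistDirty
      (stackDist, stackDistDirty, dirty_depth, lastPos.insert pid pos)
    else
      (stackDist, stackDistDirty, dirty_depth.insert pid (if prev = -1 then -1 else max prev depth), lastPos.insert pid pos)
  else
    (stackDist.insert (-1) (stackDist.getD (-1) 0 + 1), stackDistDirty,
     dirty_depth.insert pid (if write ≠ 0 then 0 else -1), lastPos.insert pid pos)

def lruStack_alt (pidAndNextAndWrite : List (Int × Int × Int)) (heatUp : Int) : (List (Int × Int)) × (List (Int × Int)) :=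
  let fin := (PySem.List.enumerate pidAndNextAndWrite 0).foldl (lruStepB heatUp)
      (PySem.Dict.empty, PySem.Dict.empty, PySem.Dict.empty, PySem.Dict.empty)
  (fin.1.items, fin.2.1.items)

-- ===== PRECONDITION & SPEC =====
def Spec_lruStack (pidAndNextAndWrite : List (Int × Int × Int)) (heatUp : Int) (out : (List (Int × Int)) × (List (Int × Int))) : Prop := out = lruStack_alt pidAndNextAndWrite heatUp
instance (pidAndNextAndWrite : List (Int × Int × Int)) (heatUp : Int) (out : (List (Int × Int)) × (List (Int × Int))) : Decidable (Spec_lruStack pidAndNextAndWrite heatUp out) := by unfold Spec_lruStack; infer_instance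

-- ===== CLAIM (what is proved, stated in full; the proofs are below) =====
def Claim_equal_lruStack : Prop := ∀ (pidAndNextAndWrite : List (Int × Int × Int)) (heatUp : Int), Dom_lruStack pidAndNextAndWrite heatUp → Spec_lruStack pidAndNextAndWrite heatUp (lruStack pidAndNextAndWrite heatUp)

-- ===== LEMMAS AND PROOFS =====

-- The coupling invariant between A's stack/stackContains and B's last_pos map:
-- last_pos has nodup keys, stackContains and last_pos have the same keys, the stack holds
-- exactly the keys of last_pos, ordered by strictly decreasing last position, all < pos.
def InvS (stack : List Int) (sc lastPos : PySem.Dict Int Int) (pos : Int) : Prop :=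
  lastPos.keys.Nodup ∧
  (∀ q, sc.contains q = lastPos.contains q) ∧
  (∀ q, q ∈ stack ↔ lastPos.contains q = true) ∧
  stack.Pairwise (fun a b => lastPos.getD b 0 < lastPos.getD a 0) ∧
  (∀ q ∈ stack, lastPos.getD q 0 < pos)

lemma nodup_of_pairwise_lt (f : Int → Int) (l : List Int)
    (hp : l.Pairwise (fun a b => f b < f a)) : l.Nodup :=
  hp.imp (fun {a b} h => by intro he; subst he; exact absurd h (lt_irrefl _))

lemma index?_of_pairwise (f : Int → Int) (l : List Int) (x : Int)
    (hp : l.Pairwise (fun a b => f b < f a)) (hx : x ∈ l) :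
    PySem.List.index? l x = some (l.countP (fun q => decide (f x < f q))) := by
  induction l with
  | nil => cases hx
  | cons h t ih =>
    rw [List.pairwise_cons] at hp
    obtain ⟨hh, hpt⟩ := hp
    by_cases he : h = x
    · subst he
      rw [PySem.List.index?_cons_self, List.countP_cons]
      have hc0 : t.countP (fun q => decide (f h < f q)) = 0 := by
        rw [List.countP_eq_zero]
        intro q hq
        simpa using not_lt.mpr (le_of_lt (hh q hq))
      simp [hc0]
    · rw [PySem.List.index?_cons_of_ne t he]
      have hxt : x ∈ t := by
        rcases List.mem_cons.mp hx with h1 | h1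
        · exact absurd h1.symm he
        · exact h1
      rw [ih hpt hxt, List.countP_cons]
      have : f x < f h := hh x hxt
      simp [this]

-- countP over the stack equals countP over last_pos's values
lemma countP_stack_eq_values (stack : List Int) (lastPos : PySem.Dict Int Int) (mine : Int)
    (hnd : lastPos.keys.Nodup)
    (hmem : ∀ q, q ∈ stack ↔ lastPos.contains q = true)
    (hsd : stack.Nodup) :
    stack.countP (fun q => decide (mine < lastPos.getD q 0))
      = (PySem.Dict.values lastPos).countP (fun p => decide (mine < p)) := by
  have hperm : stack.Perm lastPos.keys := by
    refine (List.perm_ext_iff_of_nodup hsd hnd).mpr (fun a => ?_)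
    rw [hmem a, PySem.Dict.contains_iff_mem_keys]
  rw [PySem.Dict.values_eq_map_keys lastPos hnd 0, List.countP_map, hperm.countP_eq]
  rfl

-- A's conditional counter increment is B's get-with-default increment
lemma insert_inc_eq (d : PySem.Dict Int Int) (k : Int) :
    d.insert k (if d.contains k then d.getD k 0 + 1 else 1) = d.insert k (d.getD k 0 + 1) := by
  by_cases hc : d.contains k = true
  · simp [hc]
  · simp only [Bool.not_eq_true] at hc
    rw [PySem.Dict.getD_of_not_contains d 0 hc]
    simp [hc]

lemma InvS_step_old (stack : List Int) (sc lastPos : PySem.Dict Int Int) (pos pid v : Int)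
    (h : InvS stack sc lastPos pos) (hc : lastPos.contains pid = true) :
    InvS (pid :: stack.erase pid) (sc.insert pid v) (lastPos.insert pid pos) (pos + 1) := by
  obtain ⟨hnd, hscc, hmem, hpw, hbound⟩ := h
  have hsnd : stack.Nodup := nodup_of_pairwise_lt (fun q => lastPos.getD q 0) _ hpw
  have hfe : ∀ q, q ≠ pid → (lastPos.insert pid pos).getD q 0 = lastPos.getD q 0 :=
    fun q hq => PySem.Dict.getD_insert_of_ne lastPos pos 0 hq
  have hfp : (lastPos.insert pid pos).getD pid 0 = pos := PySem.Dict.getD_insert_self lastPos pid pos 0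
  refine ⟨PySem.Dict.nodup_keys_insert _ _ _ hnd, ?_, ?_, ?_, ?_⟩
  · intro q; rw [PySem.Dict.contains_insert, PySem.Dict.contains_insert, hscc q]
  · intro q
    rw [PySem.Dict.contains_insert]
    constructor
    · intro hq
      rcases List.mem_cons.mp hq with h1 | h1
      · subst h1; simp
      · have h2 := (List.Nodup.mem_erase_iff hsnd).mp h1
        simp [(hmem q).mp h2.2]
    · intro hq
      by_cases hqp : q = pid
      · subst hqp; exact List.mem_cons_self
      · have h1 : lastPos.contains q = true := by
          rcases Bool.or_eq_true_iff.mp hq with h1 | h1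
          · exact absurd (by simpa using h1) hqp
          · exact h1
        exact List.mem_cons_of_mem _ ((List.Nodup.mem_erase_iff hsnd).mpr ⟨hqp, (hmem q).mpr h1⟩)
  · rw [List.pairwise_cons]
    constructor
    · intro b hb
      have hbe := (List.Nodup.mem_erase_iff hsnd).mp hb
      rw [hfe b hbe.1, hfp]
      exact hbound b hbe.2
    · have hsub : (stack.erase pid).Sublist stack := List.erase_sublist
      have hpw' := hpw.sublist hsub
      refine hpw'.imp_of_mem ?_
      intro a b ha hb hab
      rw [hfe a ((List.Nodup.mem_erase_iff hsnd).mp ha).1,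
        hfe b ((List.Nodup.mem_erase_iff hsnd).mp hb).1]
      exact hab
  · intro q hq
    rcases List.mem_cons.mp hq with h1 | h1
    · subst h1; rw [hfp]; omega
    · have hbe := (List.Nodup.mem_erase_iff hsnd).mp h1
      rw [hfe q hbe.1]
      have := hbound q hbe.2
      omega

lemma InvS_step_new (stack : List Int) (sc lastPos : PySem.Dict Int Int) (pos pid v : Int)
    (h : InvS stack sc lastPos pos) (hc : lastPos.contains pid = false) :
    InvS (pid :: stack) (sc.insert pid v) (lastPos.insert pid pos) (pos + 1) := by
  obtain ⟨hnd, hscc, hmem, hpw, hbound⟩ := h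
  have hnp : pid ∉ stack := fun hps => by rw [hmem pid, hc] at hps; cases hps
  have hne : ∀ q, q ∈ stack → q ≠ pid := fun q hq he => hnp (he ▸ hq)
  have hfe : ∀ q, q ≠ pid → (lastPos.insert pid pos).getD q 0 = lastPos.getD q 0 :=
    fun q hq => PySem.Dict.getD_insert_of_ne lastPos pos 0 hq
  have hfp : (lastPos.insert pid pos).getD pid 0 = pos := PySem.Dict.getD_insert_self lastPos pid pos 0
  refine ⟨PySem.Dict.nodup_keys_insert _ _ _ hnd, ?_, ?_, ?_, ?_⟩
  · intro q; rw [PySem.Dict.contains_insert, PySem.Dict.contains_insert, hscc q]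
  · intro q
    rw [PySem.Dict.contains_insert]
    constructor
    · intro hq
      rcases List.mem_cons.mp hq with h1 | h1
      · subst h1; simp
      · simp [(hmem q).mp h1]
    · intro hq
      by_cases hqp : q = pid
      · subst hqp; exact List.mem_cons_self
      · have h1 : lastPos.contains q = true := by
          rcases Bool.or_eq_true_iff.mp hq with h1 | h1
          · exact absurd (by simpa using h1) hqp
          · exact h1
        exact List.mem_cons_of_mem _ ((hmem q).mpr h1)
  · rw [List.pairwise_cons]
    constructor
    · intro b hb
      rw [hfe b (hne b hb), hfp]
      exact hbound b hb
    · refine hpw.imp_of_mem ?_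
      intro a b ha hb hab
      rw [hfe a (hne a ha), hfe b (hne b hb)]
      exact hab
  · intro q hq
    rcases List.mem_cons.mp hq with h1 | h1
    · subst h1; rw [hfp]; omega
    · rw [hfe q (hne q h1)]
      have := hbound q h1
      omega

lemma step_step (heatUp pos pid nx w : Int) (stack : List Int)
    (sc lastPos sd sdd dd : PySem.Dict Int Int)
    (h : InvS stack sc lastPos pos) :
    (lruStepA heatUp (stack, sd, sdd, sc, dd) (pos, (pid, nx, w))).2.1
        = (lruStepB heatUp (sd, sdd, dd, lastPos) (pos, (pid, nx, w))).1 ∧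
    (lruStepA heatUp (stack, sd, sdd, sc, dd) (pos, (pid, nx, w))).2.2.1
        = (lruStepB heatUp (sd, sdd, dd, lastPos) (pos, (pid, nx, w))).2.1 ∧
    (lruStepA heatUp (stack, sd, sdd, sc, dd) (pos, (pid, nx, w))).2.2.2.2
        = (lruStepB heatUp (sd, sdd, dd, lastPos) (pos, (pid, nx, w))).2.2.1 ∧
    InvS (lruStepA heatUp (stack, sd, sdd, sc, dd) (pos, (pid, nx, w))).1
      (lruStepA heatUp (stack, sd, sdd, sc, dd) (pos, (pid, nx, w))).2.2.2.1
      (lruStepB heatUp (sd, sdd, dd, lastPos) (pos, (pid, nx, w))).2.2.2 (pos + 1) := by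
  obtain ⟨hnd, hscc, hmem, hpw, hbound⟩ := h
  have hsnd : stack.Nodup := nodup_of_pairwise_lt (fun q => lastPos.getD q 0) _ hpw
  by_cases hc : lastPos.contains pid = true
  · have hsc : sc.contains pid = true := by rw [hscc]; exact hc
    have hps : pid ∈ stack := (hmem pid).mpr hc
    have hidx := index?_of_pairwise (fun q => lastPos.getD q 0) stack pid hpw hps
    have hrem := PySem.List.remove?_eq_some_erase stack pid hps
    have hcnt := countP_stack_eq_values stack lastPos (lastPos.getD pid 0) hnd hmem hsnd
    simp only [lruStepA, lruStepB, hsc, hc, hidx, hrem, if_true, Option.getD_some]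
    simp only [hcnt]
    refine ⟨?_, ?_, ?_, ?_⟩
    · simp only [insert_inc_eq]
      split_ifs <;> rfl
    · simp only [insert_inc_eq]
      split_ifs <;> rfl
    · split_ifs <;> rfl
    · split_ifs <;>
        exact InvS_step_old stack sc lastPos pos pid 0 ⟨hnd, hscc, hmem, hpw, hbound⟩ hc
  · simp only [Bool.not_eq_true] at hc
    have hsc : sc.contains pid = false := by rw [hscc]; exact hc
    simp only [lruStepA, lruStepB, hsc, hc, Bool.false_eq_true, if_false]
    refine ⟨?_, ?_, ?_, ?_⟩
    · exact insert_inc_eq _ _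
    · trivial
    · trivial
    · exact InvS_step_new stack sc lastPos pos pid 0 ⟨hnd, hscc, hmem, hpw, hbound⟩ hc

lemma fold_eq (heatUp : Int) (xs : List (Int × Int × Int)) (pos : Int)
    (stack : List Int) (sc lastPos sd sdd dd : PySem.Dict Int Int)
    (h : InvS stack sc lastPos pos) :
    ((PySem.List.enumerate xs pos).foldl (lruStepA heatUp) (stack, sd, sdd, sc, dd)).2.1
        = ((PySem.List.enumerate xs pos).foldl (lruStepB heatUp) (sd, sdd, dd, lastPos)).1 ∧
    ((PySem.List.enumerate xs pos).foldl (lruStepA heatUp) (stack, sd, sdd, sc, dd)).2.2.1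
        = ((PySem.List.enumerate xs pos).foldl (lruStepB heatUp) (sd, sdd, dd, lastPos)).2.1 := by
  induction xs generalizing pos stack sc lastPos sd sdd dd with
  | nil => exact ⟨rfl, rfl⟩
  | cons x xs ih =>
    obtain ⟨pid, nx, w⟩ := x
    rw [PySem.List.enumerate_cons]
    obtain ⟨h1, h2, h3, hI⟩ := step_step heatUp pos pid nx w stack sc lastPos sd sdd dd h
    simp only [List.foldl_cons]
    set a := lruStepA heatUp (stack, sd, sdd, sc, dd) (pos, (pid, nx, w)) with hadef
    set b := lruStepB heatUp (sd, sdd, dd, lastPos) (pos, (pid, nx, w)) with hbdef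
    have ha5 : a = (a.1, b.1, b.2.1, a.2.2.2.1, b.2.2.1) := by rw [← h1, ← h2, ← h3]
    have hb4 : b = (b.1, b.2.1, b.2.2.1, b.2.2.2) := rfl
    rw [ha5, hb4]
    exact ih (pos + 1) a.1 a.2.2.2.1 b.2.2.2 b.1 b.2.1 b.2.2.1 hI

-- ===== VERDICT (by name: the statement is the Claim_ definition above) =====
theorem lruStack_spec : Claim_equal_lruStack := by
  intro xs heatUp _
  unfold Spec_lruStack lruStack lruStack_alt
  have h0 : InvS [] PySem.Dict.empty PySem.Dict.empty 0 := by
    refine ⟨PySem.Dict.nodup_keys_empty, fun q => rfl, fun q => ?_, List.Pairwise.nil, fun q hq => absurd hq (List.not_mem_nil)⟩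
    simp [PySem.Dict.contains_empty]
  obtain ⟨h1, h2⟩ := fold_eq heatUp xs 0 [] PySem.Dict.empty PySem.Dict.empty PySem.Dict.empty PySem.Dict.empty PySem.Dict.empty h0
  simp only [h1, h2]
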